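-- pv_equiv track=rewrite | github.com/alisonlei/CMT120-assessment | template.py | get_shortest_rewarding_path
-- ===== SOURCE A (Python) =====
-- def get_shortest_rewarding_path(env,paths,max_length):
--     reward=0
--     length=max_length
--     for path in paths:
--         count=0
--         curr_len=len(path)-1
--         for step in path:
--             if env[step[0]][step[1]]=='R':
--                 count+=1
--         if curr_len<length:
--             length=curr_len
--             reward=count
--         elif curr_len==length and count>reward:
--             reward=count
--     return length,reward
-- ===== SOURCE B (Python) =====
-- def get_shortest_rewarding_path(env, paths, max_length):
--     pairs = [(len(p) - 1, sum(1 for r, c in p if env[r][c] == 'R')) for p in paths]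
--     L = min([max_length] + [cl for cl, _ in pairs])
--     reward = max([0] + [c for cl, c in pairs if cl == L])
--     return L, reward
-- ===== Notes on version B (the rewrite author's own statement) =====
-- stated objective: alternative
-- what changed: Replaces A's single interleaved running-min/conditional-reset loop with a map to (length,count) pairs followed by two independent reductions: a min over lengths (seeded with max_length) and a max over counts of the paths attaining that min (seeded with 0).
import Mathlib
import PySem

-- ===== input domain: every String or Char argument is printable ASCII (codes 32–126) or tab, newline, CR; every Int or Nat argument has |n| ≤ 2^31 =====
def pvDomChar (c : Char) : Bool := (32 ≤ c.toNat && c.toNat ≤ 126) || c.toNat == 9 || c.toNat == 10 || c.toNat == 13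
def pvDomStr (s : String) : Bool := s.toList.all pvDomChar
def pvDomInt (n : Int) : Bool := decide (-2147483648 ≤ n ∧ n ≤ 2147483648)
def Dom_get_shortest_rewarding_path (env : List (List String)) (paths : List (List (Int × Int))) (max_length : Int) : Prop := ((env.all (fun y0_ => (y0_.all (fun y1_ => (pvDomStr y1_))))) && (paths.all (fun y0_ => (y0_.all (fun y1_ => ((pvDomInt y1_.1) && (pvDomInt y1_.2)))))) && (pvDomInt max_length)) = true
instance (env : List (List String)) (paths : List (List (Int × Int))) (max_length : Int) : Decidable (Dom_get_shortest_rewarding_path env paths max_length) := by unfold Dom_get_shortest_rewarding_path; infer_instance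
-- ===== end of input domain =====

-- B replaces A's interleaved running-min/conditional-reset loop by a map to (length,count)
-- pairs followed by two independent reductions (min of lengths, max of counts at the min):
-- an alternative decomposition of the same cost.


-- ===== PORT A =====
-- env[step[0]][step[1]] == 'R'; the option chain is `some "R"` exactly when Python's
-- double indexing succeeds and yields 'R' (Pre_ below guarantees it succeeds).
def pvHitR (env : List (List String)) (step : Int × Int) : Bool :=
  ((PySem.List.pyGet? env step.1).bind (fun row => PySem.List.pyGet? row step.2)) == some "R"

def get_shortest_rewarding_path (env : List (List String)) (paths : List (List (Int × Int))) (max_length : Int) : Int × Int :=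
  paths.foldl (fun (st : Int × Int) path =>
    let count : Int := path.foldl (fun c step => if pvHitR env step then c + 1 else c) 0
    let curr_len : Int := (path.length : Int) - 1
    if curr_len < st.1 then (curr_len, count)
    else if curr_len = st.1 ∧ count > st.2 then (st.1, count)
    else st) (max_length, 0)

-- ===== PORT B =====
def get_shortest_rewarding_path_alt (env : List (List String)) (paths : List (List (Int × Int))) (max_length : Int) : Int × Int :=
  let pairs : List (Int × Int) :=
    paths.map (fun p => ((p.length : Int) - 1, (p.countP (pvHitR env) : Int)))
  let L : Int := (pairs.map Prod.fst).foldl min max_length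
  let reward : Int := ((pairs.filter (fun q => q.1 == L)).map Prod.snd).foldl max 0
  (L, reward)

-- ===== PRECONDITION & SPEC =====
-- Exactly the inputs on which Python A returns: every step of every path indexes env
-- (and the selected row) in range, else Python raises IndexError.
def Pre_get_shortest_rewarding_path (env : List (List String)) (paths : List (List (Int × Int))) (max_length : Int) : Prop :=
  ∀ path ∈ paths, ∀ step ∈ path,
    PySem.Raise.InRange env.length step.1 ∧
    PySem.Raise.InRange ((PySem.List.pyGet? env step.1).getD []).length step.2
instance (env : List (List String)) (paths : List (List (Int × Int))) (max_length : Int) : Decidable (Pre_get_shortest_rewarding_path env paths max_length) := by unfold Pre_get_shortest_rewarding_path; infer_instance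

def pvWitness_get_shortest_rewarding_path : List (List String) × (List (List (Int × Int))) × Int :=
  ([["R", "."], [".", "R"]], [[(0, 0), (1, 1)], [(0, 1)]], 5)

def Spec_get_shortest_rewarding_path (env : List (List String)) (paths : List (List (Int × Int))) (max_length : Int) (out : Int × Int) : Prop := out = get_shortest_rewarding_path_alt env paths max_length
instance (env : List (List String)) (paths : List (List (Int × Int))) (max_length : Int) (out : Int × Int) : Decidable (Spec_get_shortest_rewarding_path env paths max_length out) := by unfold Spec_get_shortest_rewarding_path; infer_instance

-- ===== CLAIM (what is proved, stated in full; the proofs are below) =====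
def Claim_equal_get_shortest_rewarding_path : Prop := ∀ (env : List (List String)) (paths : List (List (Int × Int))) (max_length : Int), Dom_get_shortest_rewarding_path env paths max_length → Pre_get_shortest_rewarding_path env paths max_length → Spec_get_shortest_rewarding_path env paths max_length (get_shortest_rewarding_path env paths max_length)

-- ===== LEMMAS AND PROOFS =====

-- Proof-side names for the quantities both loops manipulate.
def pvCnt (env : List (List String)) (p : List (Int × Int)) : Int := ((p.countP (pvHitR env) : Nat) : Int)

def pvStepA (env : List (List String)) (st : Int × Int) (path : List (Int × Int)) : Int × Int :=
  if (path.length : Int) - 1 < st.1 then ((path.length : Int) - 1, pvCnt env path)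
  else if (path.length : Int) - 1 = st.1 ∧ pvCnt env path > st.2 then (st.1, pvCnt env path)
  else st

def pvMinL (l : Int) (paths : List (List (Int × Int))) : Int :=
  paths.foldl (fun a p => min a ((p.length : Int) - 1)) l

def pvCountsAt (env : List (List String)) (L : Int) (paths : List (List (Int × Int))) : List Int :=
  (paths.filter (fun p => ((p.length : Int) - 1) == L)).map (pvCnt env)

-- A's inner counting loop is countP.
theorem foldl_count_eq_countP (env : List (List String)) (p : List (Int × Int)) (c : Int) :
    p.foldl (fun c step => if pvHitR env step then c + 1 else c) c = c + (p.countP (pvHitR env) : Int) := by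
  induction p generalizing c with
  | nil => simp
  | cons s rest ih =>
    simp only [List.foldl_cons, List.countP_cons]
    by_cases h : pvHitR env s = true <;> simp [h, ih] <;> omega

-- A's loop body is pvStepA.
theorem stepA_eq (env : List (List String)) :
    (fun (st : Int × Int) path =>
      let count : Int := path.foldl (fun c step => if pvHitR env step then c + 1 else c) 0
      let curr_len : Int := (path.length : Int) - 1
      if curr_len < st.1 then (curr_len, count)
      else if curr_len = st.1 ∧ count > st.2 then (st.1, count)
      else st) = pvStepA env := by
  funext st path
  simp only [pvStepA, pvCnt, foldl_count_eq_countP, zero_add]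

theorem pvMinL_cons (l : Int) (p : List (Int × Int)) (rest : List (List (Int × Int))) :
    pvMinL l (p :: rest) = pvMinL (min l ((p.length : Int) - 1)) rest := rfl

theorem pvMinL_le (paths : List (List (Int × Int))) (l : Int) : pvMinL l paths ≤ l := by
  induction paths generalizing l with
  | nil => simp [pvMinL]
  | cons p rest ih => exact le_trans (ih _) (min_le_left _ _)

theorem pvCountsAt_cons (env : List (List String)) (L : Int) (p : List (Int × Int)) (rest : List (List (Int × Int))) :
    pvCountsAt env L (p :: rest) =
      if ((p.length : Int) - 1) = L then pvCnt env p :: pvCountsAt env L rest else pvCountsAt env L rest := by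
  by_cases h : ((p.length : Int) - 1) = L <;> simp [pvCountsAt, h]

theorem pvCnt_nonneg (env : List (List String)) (p : List (Int × Int)) : (0:Int) ≤ pvCnt env p :=
  Int.natCast_nonneg _

-- The running-state characterisation of A's outer loop.
theorem foldA_char (env : List (List String)) (paths : List (List (Int × Int))) (l r : Int) :
    paths.foldl (pvStepA env) (l, r)
      = (pvMinL l paths, (pvCountsAt env (pvMinL l paths) paths).foldl max (if pvMinL l paths = l then r else 0)) := by
  induction paths generalizing l r with
  | nil => simp [pvMinL, pvCountsAt]
  | cons p rest ih =>
    have hcp := pvCnt_nonneg env p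
    rw [List.foldl_cons, pvMinL_cons]
    by_cases h1 : ((p.length : Int) - 1) < l
    · have hstep : pvStepA env (l, r) p = (((p.length : Int) - 1), pvCnt env p) := by
        unfold pvStepA; rw [if_pos h1]
      have hmin : min l ((p.length : Int) - 1) = (p.length : Int) - 1 := by omega
      rw [hstep, ih, hmin, pvCountsAt_cons]
      have hle := pvMinL_le rest ((p.length : Int) - 1)
      by_cases h2 : pvMinL ((p.length : Int) - 1) rest = (p.length : Int) - 1
      · have hne : ¬ ((p.length : Int) - 1) = l := by omega
        simp [h2, hne, List.foldl_cons, max_eq_right hcp]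
      · have hne2 : ¬ pvMinL ((p.length : Int) - 1) rest = l := by omega
        have hne3 : ¬ ((p.length : Int) - 1) = pvMinL ((p.length : Int) - 1) rest := fun h => h2 h.symm
        simp [h2, hne2, hne3]
    · have hmin : min l ((p.length : Int) - 1) = l := by omega
      rw [hmin]
      by_cases h2 : ((p.length : Int) - 1) = l ∧ pvCnt env p > r
      · have hstep : pvStepA env (l, r) p = (l, pvCnt env p) := by
          unfold pvStepA; rw [if_neg h1, if_pos h2]
        rw [hstep, ih, pvCountsAt_cons]
        have hle := pvMinL_le rest l
        by_cases h3 : pvMinL l rest = l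
        · simp [h3, h2.1, List.foldl_cons, max_eq_right (le_of_lt h2.2)]
        · have hne : ¬ ((p.length : Int) - 1) = pvMinL l rest := by
            have := h2.1; omega
          simp [h3, hne]
      · have hstep : pvStepA env (l, r) p = (l, r) := by
          unfold pvStepA; rw [if_neg h1, if_neg h2]
        rw [hstep, ih, pvCountsAt_cons]
        have hle := pvMinL_le rest l
        by_cases h4 : ((p.length : Int) - 1) = pvMinL l rest
        · have hcl : ((p.length : Int) - 1) = l := by omega
          have h3 : pvMinL l rest = l := by omega
          have hcpr : pvCnt env p ≤ r := not_lt.mp (fun hlt => h2 ⟨hcl, hlt⟩)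
          simp [h4, h3, List.foldl_cons, max_eq_left hcpr]
        · simp [h4]

-- B unfolded to the same two reductions over paths.
theorem altB_char (env : List (List String)) (paths : List (List (Int × Int))) (ml : Int) :
    get_shortest_rewarding_path_alt env paths ml
      = (pvMinL ml paths, (pvCountsAt env (pvMinL ml paths) paths).foldl max 0) := by
  unfold get_shortest_rewarding_path_alt
  simp only [pvMinL, pvCountsAt, pvCnt, List.foldl_map, List.filter_map, List.map_map,
    Function.comp_def]

-- ===== VERDICT (by name: the statement is the Claim_ definition above) =====
theorem get_shortest_rewarding_path_spec : Claim_equal_get_shortest_rewarding_path := by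
  intro env paths max_length _ _
  show _ = _
  unfold get_shortest_rewarding_path
  rw [stepA_eq, foldA_char, altB_char]
  have h0 : (if pvMinL max_length paths = max_length then (0:Int) else 0) = 0 := by
    split <;> rfl
  rw [h0]
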